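-- pv_equiv track=rewrite | github.com/Hannan2004/SIH-25069 | backend/compliance_agent.py | _extract_compliance_recommendations
-- ===== SOURCE A (Python) =====
-- from typing import Dict, List, Optional, Any, Union
--
-- def _extract_compliance_recommendations(ai_analysis: str) -> List[Dict[str, str]]:
--     """Extract specific compliance recommendations from AI analysis"""
--
--     recommendations = []
--     lines = ai_analysis.split('\n')
--
--     current_recommendation = None
--     for line in lines:
--         line = line.strip()
--
--         # Look for recommendation indicators
--         if any(indicator in line.lower() for indicator in
--               ['recommend', 'should', 'must', 'ensure', 'implement', 'establish']):
--             if current_recommendation: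
--                 recommendations.append(current_recommendation)
--
--             # Determine priority based on keywords
--             priority = "high"
--             if any(word in line.lower() for word in ['critical', 'mandatory', 'must', 'required']):
--                 priority = "high"
--             elif any(word in line.lower() for word in ['should', 'recommend', 'important']):
--                 priority = "medium"
--             elif any(word in line.lower() for word in ['consider', 'optional', 'enhance']):
--                 priority = "low"
--
--             current_recommendation = {
--                 "recommendation": line,
--                 "priority": priority,
--                 "category": "compliance"
--             }
--         elif current_recommendation and line:
--             # Continue building current recommendation
--             current_recommendation["recommendation"] += " " + line
--
--     if current_recommendation:
--         recommendations.append(current_recommendation)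
--
--     return recommendations[:8]  # Top 8 recommendations
-- ===== SOURCE B (Python) =====
-- def _extract_compliance_recommendations(ai_analysis: str):
--     """Extract specific compliance recommendations from AI analysis (two-pass: segment into blocks, then map)."""
--     indicators = ['recommend', 'should', 'must', 'ensure', 'implement', 'establish']
--
--     def is_indicator(ln):
--         low = ln.lower()
--         return any(k in low for k in indicators)
--
--     lines = [ln.strip() for ln in ai_analysis.split('\n')]
--
--     # Pass 1: segment into blocks, each starting at an indicator line and taking
--     # the following non-empty lines up to (not including) the next indicator line.
--     blocks = []
--     i = 0
--     while i < len(lines) and not is_indicator(lines[i]):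
--         i += 1
--     while i < len(lines):
--         j = i + 1
--         while j < len(lines) and not is_indicator(lines[j]):
--             j += 1
--         blocks.append([lines[i]] + [ln for ln in lines[i + 1:j] if ln])
--         i = j
--
--     # Pass 2: map each of the first 8 blocks to a recommendation dict.
--     def mk(block):
--         head = block[0].lower()
--         if any(w in head for w in ['critical', 'mandatory', 'must', 'required']):
--             priority = "high"
--         elif any(w in head for w in ['should', 'recommend', 'important']):
--             priority = "medium"
--         elif any(w in head for w in ['consider', 'optional', 'enhance']):
--             priority = "low"
--         else:
--             priority = "high"
--         return {"recommendation": " ".join(block),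
--                 "priority": priority,
--                 "category": "compliance"}
--
--     return [mk(b) for b in blocks[:8]]
-- ===== Notes on version B (the rewrite author's own statement) =====
-- stated objective: alternative
-- what changed: A's single stateful scan carrying a mutable current-recommendation dict is replaced by a two-pass decomposition: first segment the stripped lines into indicator-headed blocks (takeWhile/dropWhile-style segmentation), then map each of the first 8 blocks to its record, joining the block's lines and computing priority from its head line.
import Mathlib
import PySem

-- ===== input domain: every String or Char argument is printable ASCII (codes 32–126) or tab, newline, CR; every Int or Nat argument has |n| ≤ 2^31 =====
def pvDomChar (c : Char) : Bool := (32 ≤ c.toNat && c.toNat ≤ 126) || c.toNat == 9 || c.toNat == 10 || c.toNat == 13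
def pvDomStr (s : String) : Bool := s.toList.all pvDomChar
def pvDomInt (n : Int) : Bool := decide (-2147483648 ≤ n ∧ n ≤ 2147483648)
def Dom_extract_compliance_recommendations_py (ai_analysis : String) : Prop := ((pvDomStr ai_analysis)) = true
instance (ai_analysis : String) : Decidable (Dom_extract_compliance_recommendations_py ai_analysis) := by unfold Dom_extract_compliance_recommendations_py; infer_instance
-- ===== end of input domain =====

-- B re-decomposes A's one stateful scan as two passes — segment the stripped lines into
-- indicator-headed blocks, then map each block to its record — same output (objective: alternative).

-- shared keyword tables and tests (identical in both Pythons)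
def pvIndicators : List String := ["recommend", "should", "must", "ensure", "implement", "establish"]
def pvHighWords : List String := ["critical", "mandatory", "must", "required"]
def pvMedWords : List String := ["should", "recommend", "important"]
def pvLowWords : List String := ["consider", "optional", "enhance"]

def pvIsInd (line : String) : Bool :=
  pvIndicators.any (fun k => PySem.Str.isIn k (PySem.Str.lower line))

def pvPriority (line : String) : String :=
  if pvHighWords.any (fun w => PySem.Str.isIn w (PySem.Str.lower line)) then "high"
  else if pvMedWords.any (fun w => PySem.Str.isIn w (PySem.Str.lower line)) then "medium"
  else if pvLowWords.any (fun w => PySem.Str.isIn w (PySem.Str.lower line)) then "low"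
  else "high"

-- ===== PORT A =====
-- loop body: state = (recommendations so far, current_recommendation)
def pvStepA (st : List (PySem.Dict String String) × Option (PySem.Dict String String))
    (raw : String) : List (PySem.Dict String String) × Option (PySem.Dict String String) :=
  let line := PySem.Str.strip raw
  if pvIsInd line then
    (match st.2 with | some c => st.1 ++ [c] | none => st.1,
     some (PySem.Dict.ofList
       [("recommendation", line), ("priority", pvPriority line), ("category", "compliance")]))
  else if st.2.isSome && line != "" then
    (st.1, st.2.map (fun c => c.modify "recommendation" "" (fun v => v ++ " " ++ line)))
  else st

def extract_compliance_recommendations_py (ai_analysis : String) : List (List (String × String)) :=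
  let lines := (PySem.Str.split? ai_analysis "\n").getD []
  let st := lines.foldl pvStepA ([], none)
  let recommendations := match st.2 with | some c => st.1 ++ [c] | none => st.1
  (PySem.List.slice recommendations none (some 8)).map PySem.Dict.items

-- ===== PORT B =====
-- pass 1: segment the stripped lines into blocks, each headed by an indicator line and
-- carrying the following non-empty lines up to the next indicator line
def pvSegment : List String → List (List String)
  | [] => []
  | l :: rest =>
    if pvIsInd l then
      (l :: (rest.takeWhile (fun x => !pvIsInd x)).filter (fun x => x != "")) ::
        pvSegment (rest.dropWhile (fun x => !pvIsInd x))
    else pvSegment rest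
termination_by L => L.length
decreasing_by
  · exact Nat.lt_succ_of_le (rest.length_dropWhile_le _)
  · simp

-- pass 2: one block → one record
def pvMkRec (block : List String) : List (String × String) :=
  match block with
  | [] => []
  | h :: _ =>
    [("recommendation", PySem.Str.join " " block),
     ("priority", pvPriority h),
     ("category", "compliance")]

def extract_compliance_recommendations_py_alt (ai_analysis : String) : List (List (String × String)) :=
  let lines := ((PySem.Str.split? ai_analysis "\n").getD []).map PySem.Str.strip
  ((pvSegment lines).take 8).map pvMkRec

-- ===== PRECONDITION & SPEC =====
def Spec_extract_compliance_recommendations_py (ai_analysis : String) (out : List (List (String × String))) : Prop := out = extract_compliance_recommendations_py_alt ai_analysis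
instance (ai_analysis : String) (out : List (List (String × String))) : Decidable (Spec_extract_compliance_recommendations_py ai_analysis out) := by unfold Spec_extract_compliance_recommendations_py; infer_instance

-- ===== CLAIM (what is proved, stated in full; the proofs are below) =====
def Claim_equal_extract_compliance_recommendations_py : Prop := ∀ (ai_analysis : String), Dom_extract_compliance_recommendations_py ai_analysis → Spec_extract_compliance_recommendations_py ai_analysis (extract_compliance_recommendations_py ai_analysis)

-- ===== LEMMAS AND PROOFS =====

-- the dict A carries for a block (proof-only helper)
def pvBlockDict (b : List String) : PySem.Dict String String :=
  PySem.Dict.ofList (pvMkRec b)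

theorem pv_join_cons₂ (sep a b : String) (r : List String) :
    PySem.Str.join sep (a :: b :: r) = a ++ sep ++ PySem.Str.join sep (b :: r) := by
  apply String.toList_inj.mp
  simp [PySem.Chars.join_cons_cons]

theorem pv_join_singleton (sep a : String) : PySem.Str.join sep [a] = a := by
  apply String.toList_inj.mp
  simp [PySem.Chars.join_singleton]

theorem pv_join_append_last (h l : String) (t : List String) :
    PySem.Str.join " " ((h :: t) ++ [l]) = PySem.Str.join " " (h :: t) ++ " " ++ l := by
  induction t generalizing h with
  | nil => simp [pv_join_cons₂, pv_join_singleton]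
  | cons x xs ih =>
    have hx := ih x
    simp only [List.cons_append] at hx ⊢
    rw [pv_join_cons₂, hx, pv_join_cons₂ " " h x xs]
    simp [String.append_assoc]

theorem pv_isInd_empty : pvIsInd "" = false := by decide

theorem pv_blockDict_singleton (line : String) :
    PySem.Dict.ofList
      [("recommendation", line), ("priority", pvPriority line), ("category", "compliance")] =
    pvBlockDict [line] := by
  simp [pvBlockDict, pvMkRec, pv_join_singleton]

theorem pv_modify_blockDict (h l : String) (t : List String) :
    (pvBlockDict (h :: t)).modify "recommendation" "" (fun v => v ++ " " ++ l) =
    pvBlockDict (h :: (t ++ [l])) := by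
  have key : ∀ v1 v2 v3 : String,
      (PySem.Dict.ofList [("recommendation", v1), ("priority", v2), ("category", v3)]).modify
        "recommendation" "" (fun v => v ++ " " ++ l) =
      PySem.Dict.ofList [("recommendation", v1 ++ " " ++ l), ("priority", v2), ("category", v3)] :=
    fun _ _ _ => rfl
  have hj := pv_join_append_last h l t
  simp only [pvBlockDict, pvMkRec, key]
  rw [← hj]
  simp

theorem pv_items_blockDict (b : List String) :
    (pvBlockDict b).items = pvMkRec b := by
  cases b with
  | nil => rfl
  | cons h t => rfl

-- A's final flush
def pvFinalA (st : List (PySem.Dict String String) × Option (PySem.Dict String String)) :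
    List (PySem.Dict String String) :=
  match st.2 with | some c => st.1 ++ [c] | none => st.1

theorem pv_inv_cont (L : List String) (recs : List (PySem.Dict String String))
    (h : String) (t : List String) :
    pvFinalA (L.foldl pvStepA (recs, some (pvBlockDict (h :: t)))) =
    recs ++ (pvBlockDict ((h :: t) ++
        ((L.map PySem.Str.strip).takeWhile (fun x => !pvIsInd x)).filter (fun x => x != ""))) ::
      (pvSegment ((L.map PySem.Str.strip).dropWhile (fun x => !pvIsInd x))).map pvBlockDict := by
  induction L generalizing recs h t with
  | nil => simp [pvFinalA, pvSegment]
  | cons l rest ih =>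
    by_cases hind : pvIsInd (PySem.Str.strip l) = true
    · simp only [List.foldl_cons, pvStepA, hind, if_pos, pv_blockDict_singleton]
      rw [ih]
      simp [pvSegment, hind]
    · by_cases hne : PySem.Str.strip l = ""
      · have : pvStepA (recs, some (pvBlockDict (h :: t))) l = (recs, some (pvBlockDict (h :: t))) := by
          simp [pvStepA, hne, pv_isInd_empty]
        rw [List.foldl_cons, this, ih]
        simp [hne, pv_isInd_empty]
      · have : pvStepA (recs, some (pvBlockDict (h :: t))) l =
            (recs, some (pvBlockDict (h :: (t ++ [PySem.Str.strip l])))) := by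
          simp [pvStepA, hind, hne, pv_modify_blockDict]
        rw [List.foldl_cons, this, ih]
        simp [hind, hne]

theorem pv_inv_none (L : List String) (recs : List (PySem.Dict String String)) :
    pvFinalA (L.foldl pvStepA (recs, none)) =
    recs ++ (pvSegment (L.map PySem.Str.strip)).map pvBlockDict := by
  induction L generalizing recs with
  | nil => simp [pvFinalA, pvSegment]
  | cons l rest ih =>
    by_cases hind : pvIsInd (PySem.Str.strip l) = true
    · simp only [List.foldl_cons, pvStepA, hind, if_pos, pv_blockDict_singleton]
      rw [pv_inv_cont]
      simp [pvSegment, hind]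
    · have : pvStepA (recs, none) l = (recs, none) := by
        simp [pvStepA, hind]
      rw [List.foldl_cons, this, ih]
      simp [pvSegment, hind]

-- ===== VERDICT (by name: the statement is the Claim_ definition above) =====
theorem extract_compliance_recommendations_py_spec : Claim_equal_extract_compliance_recommendations_py := by
  intro s _
  show _ = _
  have hA : extract_compliance_recommendations_py s =
      (PySem.List.slice
        (pvFinalA (List.foldl pvStepA ([], none) ((PySem.Str.split? s "\n").getD [])))
        none (some 8)).map PySem.Dict.items := rfl
  have hB : extract_compliance_recommendations_py_alt s =
      ((pvSegment (((PySem.Str.split? s "\n").getD []).map PySem.Str.strip)).take 8).map pvMkRec := rfl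
  rw [hA, hB, pv_inv_none, List.nil_append,
    PySem.List.slice_to _ (by norm_num : (0 : Int) ≤ 8)]
  rw [← List.map_take, List.map_map]
  exact List.map_congr_left (fun b _ => pv_items_blockDict b)
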